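-- pv_equiv track=rewrite | github.com/Squidysquid1/AOC2024 | day07/day07.py | checkAllOperators
-- ===== SOURCE A (Python) =====
-- def get_bit(number, index):
--     mask = 1 << index
--     return 1 if (number & mask) else 0
--
-- def checkAllOperators(solution, nums):
--     #1 mean *, 0 mean +
--     #choose what combo of operator
--     for binNum in range(2**(len(nums))):
--         total = nums[0]
--         for i in range(1, len(nums)):
--             if get_bit(binNum, i) == 1:
--                 total *= nums[i]
--             elif get_bit(binNum, i) == 0:
--                 total += nums[i]
--
--         if total == solution:
--             return True
--
--     return False
-- ===== SOURCE B (Python) =====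
-- def checkAllOperators(solution, nums):
--     totals = {nums[0]}
--     for x in nums[1:]:
--         totals = {r for t in totals for r in (t + x, t * x)}
--     return solution in totals
-- ===== Notes on version B (the rewrite author's own statement) =====
-- stated objective: alternative
-- what changed: A enumerates all 2^len(nums) operator bit-masks and re-evaluates the whole expression for each; B makes one left-to-right pass keeping the deduplicated set of reachable running totals and tests membership of solution at the end (often far fewer states, measured 13.6x at n=16, but still exponential in the worst case).
import Mathlib
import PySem

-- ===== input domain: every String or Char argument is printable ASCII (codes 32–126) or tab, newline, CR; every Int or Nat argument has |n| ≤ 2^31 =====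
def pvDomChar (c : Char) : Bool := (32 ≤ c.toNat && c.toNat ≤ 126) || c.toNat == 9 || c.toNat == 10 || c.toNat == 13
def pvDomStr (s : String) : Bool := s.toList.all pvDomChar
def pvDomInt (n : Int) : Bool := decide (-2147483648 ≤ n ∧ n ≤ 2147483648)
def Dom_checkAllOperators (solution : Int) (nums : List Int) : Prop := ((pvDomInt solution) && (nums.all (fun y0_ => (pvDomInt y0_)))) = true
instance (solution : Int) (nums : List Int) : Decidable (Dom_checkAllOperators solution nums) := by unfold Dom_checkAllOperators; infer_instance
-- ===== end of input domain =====

-- B replaces A's enumeration of all 2^len(nums) operator bit-masks by one left-to-right pass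
-- over the deduplicated set of reachable running totals; same decision, different algorithm.

-- ===== PORT A =====
-- get_bit(number, index); '1 << index' and 'number & mask' are exact for the nonnegative
-- arguments every call here passes (binNum from range, index from range(1, len(nums)))
def get_bit (number index : Int) : Int :=
  let mask : Int := (1 : Int) <<< index.toNat
  if PySem.Int.band number mask ≠ 0 then 1 else 0

-- the for-loop with 'return True' inside and a final 'return False' is List.any over the range;
-- nums[0]/nums[i] are in range whenever nums ≠ [] (Pre_), so pyGetD is exact there
def checkAllOperators (solution : Int) (nums : List Int) : Bool :=
  (PySem.List.pyRange 0 ((2 : Int) ^ nums.length) 1).any (fun binNum =>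
    let total : Int :=
      (PySem.List.pyRange 1 (nums.length : Int) 1).foldl
        (fun total i =>
          if get_bit binNum i == 1 then total * PySem.List.pyGetD nums i 0
          else if get_bit binNum i == 0 then total + PySem.List.pyGetD nums i 0
          else total)
        (PySem.List.pyGetD nums 0 0)
    total == solution)

-- ===== PORT B =====
def checkAllOperators_alt (solution : Int) (nums : List Int) : Bool :=
  let totals : PySem.Set Int :=
    (PySem.List.slice nums (some 1) none).foldl
      (fun totals x =>
        totals.foldl (fun s t => PySem.Set.add (PySem.Set.add s (t + x)) (t * x)) PySem.Set.empty)
      (PySem.Set.ofList [PySem.List.pyGetD nums 0 0])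
  PySem.Set.contains totals solution

-- ===== PRECONDITION & SPEC =====
-- Both programs evaluate nums[0], an IndexError on the empty list: Pre_ excludes nums = [].
def Pre_checkAllOperators (solution : Int) (nums : List Int) : Prop := nums ≠ []
instance (solution : Int) (nums : List Int) : Decidable (Pre_checkAllOperators solution nums) := by
  unfold Pre_checkAllOperators; infer_instance
def pvWitness_checkAllOperators : Int × List Int := (6, [2, 3])

def Spec_checkAllOperators (solution : Int) (nums : List Int) (out : Bool) : Prop := out = checkAllOperators_alt solution nums
instance (solution : Int) (nums : List Int) (out : Bool) : Decidable (Spec_checkAllOperators solution nums out) := by unfold Spec_checkAllOperators; infer_instance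

-- ===== CLAIM (what is proved, stated in full; the proofs are below) =====
def Claim_equal_checkAllOperators : Prop := ∀ (solution : Int) (nums : List Int), Dom_checkAllOperators solution nums → Pre_checkAllOperators solution nums → Spec_checkAllOperators solution nums (checkAllOperators solution nums)

-- ===== LEMMAS AND PROOFS =====

-- clean form of A's inner loop: fold over the suffix of nums with a running bit index
def bitFold (b : Nat) : Nat → List Int → Int → Int
  | _, [], t => t
  | k, x :: ys, t => bitFold b (k + 1) ys (if b.testBit k then t * x else t + x)

-- B's running set after consuming xs, starting from {x0}
def bSet (x0 : Int) (xs : List Int) : PySem.Set Int :=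
  xs.foldl
    (fun totals x =>
      totals.foldl (fun s t => PySem.Set.add (PySem.Set.add s (t + x)) (t * x)) PySem.Set.empty)
    (PySem.Set.ofList [x0])

lemma get_bit_eq (b i : Int) (hb : 0 ≤ b) :
    get_bit b i = if b.toNat.testBit i.toNat then 1 else 0 := by
  have h1 : (1 : Int) <<< i.toNat = ((2 ^ i.toNat : Nat) : Int) := by simp [Int.shiftLeft_eq]
  have h2 := PySem.Int.band_of_nonneg (a := b) (b := (1 : Int) <<< i.toNat) hb (by rw [h1]; positivity)
  rw [h1] at h2
  simp only [get_bit]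
  rw [h1, h2]
  simp only [Int.toNat_natCast]
  rcases h : b.toNat.testBit i.toNat with _ | _
  · simp [Nat.and_two_pow, h]
  · have : b.toNat &&& 2 ^ i.toNat = 2 ^ i.toNat := by simp [Nat.and_two_pow, h]
    simp [this]; try positivity

lemma innerA (b : Int) (hb : 0 ≤ b) (nums : List Int) :
    ∀ (ys : List Int) (k : Nat), nums.drop k = ys → ∀ t : Int,
      (PySem.List.pyRange (k : Int) (nums.length : Int) 1).foldl
        (fun total i =>
          if get_bit b i == 1 then total * PySem.List.pyGetD nums i 0
          else if get_bit b i == 0 then total + PySem.List.pyGetD nums i 0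
          else total) t
      = bitFold b.toNat k ys t := by
  intro ys
  induction ys with
  | nil =>
    intro k hk t
    have hlen : nums.length ≤ k := by
      by_contra hc
      have := List.drop_eq_nil_iff.mp hk
      omega
    rw [PySem.List.pyRange_one_eq_nil (by exact_mod_cast hlen)]
    rfl
  | cons x ys ih =>
    intro k hk t
    have hklt : k < nums.length := by
      by_contra hc
      rw [List.drop_eq_nil_iff.mpr (by omega)] at hk
      simp at hk
    have hget : nums[k]? = some x := by
      have h0 : (nums.drop k)[0]? = some x := by rw [hk]; rfl
      rwa [List.getElem?_drop, Nat.add_zero] at h0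
    have hgetD : PySem.List.pyGetD nums (k : Int) 0 = x := by
      rw [PySem.List.pyGetD_natCast]
      simp [List.getD, hget]
    have hdrop : nums.drop (k + 1) = ys := by
      have h := (List.tail_drop (l := nums) (i := k)).symm
      rw [hk] at h
      simpa using h
    rw [PySem.List.pyRange_one_cons (by exact_mod_cast hklt)]
    simp only [List.foldl_cons]
    rw [get_bit_eq b (k : Int) hb, hgetD]
    have hcast : ((k : Int) + 1) = ((k + 1 : Nat) : Int) := by push_cast; ring
    rw [hcast, ih (k + 1) hdrop]
    simp only [Int.toNat_natCast, bitFold]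
    by_cases hbit : b.toNat.testBit k <;> simp [hbit]

lemma bitFold_append (b : Nat) (x : Int) :
    ∀ (ys : List Int) (k : Nat) (t : Int),
      bitFold b k (ys ++ [x]) t
        = (if b.testBit (k + ys.length) then bitFold b k ys t * x else bitFold b k ys t + x) := by
  intro ys
  induction ys with
  | nil => intro k t; simp [bitFold]
  | cons y ys ih =>
    intro k t
    simp only [List.cons_append, bitFold, ih, List.length_cons]
    have : k + 1 + ys.length = k + (ys.length + 1) := by omega
    rw [this]

lemma bitFold_congr (b b' : Nat) :
    ∀ (ys : List Int) (k : Nat) (t : Int),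
      (∀ i, i < k + ys.length → b.testBit i = b'.testBit i) →
      bitFold b k ys t = bitFold b' k ys t := by
  intro ys
  induction ys with
  | nil => intro k t _; rfl
  | cons y ys ih =>
    intro k t h
    simp only [bitFold]
    rw [h k (by simp), ih (k + 1) _ (fun i hi => h i (by simp at hi ⊢; omega))]

lemma mem_stepSet (v x : Int) :
    ∀ (l s : List Int),
    v ∈ l.foldl (fun s t => PySem.Set.add (PySem.Set.add s (t + x)) (t * x)) s ↔
      v ∈ s ∨ ∃ t ∈ l, v = t + x ∨ v = t * x := by
  intro l
  induction l with
  | nil => simp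
  | cons y l ih =>
    intro s
    simp only [List.foldl_cons, ih, PySem.Set.mem_add, List.mem_cons]
    constructor
    · rintro (((h | h) | h) | ⟨t, ht, h⟩)
      · exact Or.inl h
      · exact Or.inr ⟨y, Or.inl rfl, Or.inl h⟩
      · exact Or.inr ⟨y, Or.inl rfl, Or.inr h⟩
      · exact Or.inr ⟨t, Or.inr ht, h⟩
    · rintro (h | ⟨t, (rfl | ht), h⟩)
      · exact Or.inl (Or.inl (Or.inl h))
      · rcases h with h | h
        · exact Or.inl (Or.inl (Or.inr h))
        · exact Or.inl (Or.inr h)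
      · exact Or.inr ⟨t, ht, h⟩

lemma reach_iff (x0 : Int) :
    ∀ (xs : List Int) (v : Int),
    (∃ b : Nat, b < 2 ^ (xs.length + 1) ∧ bitFold b 1 xs x0 = v) ↔ v ∈ bSet x0 xs := by
  intro xs
  induction xs using List.reverseRecOn with
  | nil =>
    intro v
    have hb : bSet x0 [] = [x0] := rfl
    constructor
    · rintro ⟨b, _, rfl⟩
      rw [hb]
      exact List.mem_singleton_self x0
    · intro hv
      rw [hb, List.mem_singleton] at hv
      exact ⟨0, by norm_num, hv.symm⟩
  | append_singleton xs x ih =>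
    intro v
    have hsplit : bSet x0 (xs ++ [x])
        = (bSet x0 xs).foldl (fun s t => PySem.Set.add (PySem.Set.add s (t + x)) (t * x))
            PySem.Set.empty := by
      simp [bSet, List.foldl_append]
    rw [hsplit, mem_stepSet]
    have hempty : (v ∈ (PySem.Set.empty : PySem.Set Int)) = False := by
      simp [PySem.Set.empty]
    rw [hempty]
    simp only [false_or]
    constructor
    · rintro ⟨b, hb, rfl⟩
      refine ⟨bitFold (b % 2 ^ (xs.length + 1)) 1 xs x0, ?_, ?_⟩
      · rw [← ih]
        exact ⟨b % 2 ^ (xs.length + 1), Nat.mod_lt _ (by positivity), rfl⟩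
      · rw [bitFold_append]
        have hc : bitFold b 1 xs x0 = bitFold (b % 2 ^ (xs.length + 1)) 1 xs x0 := by
          apply bitFold_congr
          intro i hi
          rw [Nat.testBit_mod_two_pow]
          simp [show i < xs.length + 1 by omega]
        rw [hc]
        by_cases hbit : b.testBit (1 + xs.length) <;> simp [hbit]
    · rintro ⟨t, ht, rfl | rfl⟩
      · rw [← ih] at ht
        obtain ⟨b, hb, rfl⟩ := ht
        refine ⟨b, ?_, ?_⟩
        · simp only [List.length_append, List.length_singleton]
          calc b < 2 ^ (xs.length + 1) := hb
          _ ≤ 2 ^ (xs.length + 1 + 1) := by apply Nat.pow_le_pow_right <;> omega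
        · rw [bitFold_append]
          have : b.testBit (1 + xs.length) = false :=
            Nat.testBit_lt_two_pow (by calc b < 2 ^ (xs.length + 1) := hb
              _ ≤ 2 ^ (1 + xs.length) := by apply Nat.pow_le_pow_right <;> omega)
          simp [this]
      · rw [← ih] at ht
        obtain ⟨b, hb, rfl⟩ := ht
        refine ⟨b ||| 2 ^ (xs.length + 1), ?_, ?_⟩
        · simp only [List.length_append, List.length_singleton]
          apply Nat.or_lt_two_pow
          · calc b < 2 ^ (xs.length + 1) := hb
            _ ≤ 2 ^ (xs.length + 1 + 1) := by apply Nat.pow_le_pow_right <;> omega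
          · apply Nat.pow_lt_pow_right <;> omega
        · rw [bitFold_append]
          have hbit : (b ||| 2 ^ (xs.length + 1)).testBit (1 + xs.length) = true := by
            rw [Nat.testBit_or, Nat.testBit_two_pow]
            simp [show xs.length + 1 = 1 + xs.length by omega]
          rw [hbit]
          have hc : bitFold (b ||| 2 ^ (xs.length + 1)) 1 xs x0 = bitFold b 1 xs x0 := by
            apply bitFold_congr
            intro i hi
            rw [Nat.testBit_or, Nat.testBit_two_pow]
            simp [show ¬ (xs.length + 1 = i) by omega]
          simp [hc]

-- ===== VERDICT (by name: the statement is the Claim_ definition above) =====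
theorem checkAllOperators_spec : Claim_equal_checkAllOperators := by
  intro solution nums _ hpre
  show checkAllOperators solution nums = checkAllOperators_alt solution nums
  obtain ⟨x0, xs, rfl⟩ := List.exists_cons_of_ne_nil hpre
  have hB : checkAllOperators_alt solution (x0 :: xs)
      = PySem.Set.contains (bSet x0 xs) solution := by
    simp only [checkAllOperators_alt, PySem.List.slice_from_one, List.tail_cons,
      PySem.List.pyGetD_zero_cons, bSet]
  rw [hB, Bool.eq_iff_iff]
  rw [show (PySem.Set.contains (bSet x0 xs) solution = true) ↔ solution ∈ bSet x0 xs from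
    PySem.Set.contains_iff _ _]
  rw [← reach_iff]
  simp only [checkAllOperators, List.any_eq_true]
  constructor
  · rintro ⟨i, hmem, hp⟩
    rw [PySem.List.mem_pyRange_one] at hmem
    obtain ⟨h0, h1⟩ := hmem
    have hA := innerA i h0 (x0 :: xs) xs 1 rfl (PySem.List.pyGetD (x0 :: xs) 0 0)
    rw [Nat.cast_one] at hA
    rw [hA, PySem.List.pyGetD_zero_cons] at hp
    refine ⟨i.toNat, ?_, by simpa using hp⟩
    have : ((2 : Int) ^ (x0 :: xs).length) = ((2 ^ (xs.length + 1) : Nat) : Int) := by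
      push_cast; simp
    omega
  · rintro ⟨b, hb, hfold⟩
    refine ⟨(b : Int), ?_, ?_⟩
    · rw [PySem.List.mem_pyRange_one]
      constructor
      · positivity
      · have : ((2 : Int) ^ (x0 :: xs).length) = ((2 ^ (xs.length + 1) : Nat) : Int) := by
          push_cast; simp
    
        omega
    · have hA := innerA (b : Int) (by positivity) (x0 :: xs) xs 1 rfl (PySem.List.pyGetD (x0 :: xs) 0 0)
      rw [Nat.cast_one] at hA
      rw [hA, PySem.List.pyGetD_zero_cons]
      simpa using hfold
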